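-- pv_equiv track=rewrite | github.com/brentyi/egoallo | src/egoallo/data/egopose_meta.py | _get_take_type
-- ===== SOURCE A (Python) =====
-- from typing import Any, Literal, Sequence
--
-- def _get_take_type(take_name: str) -> Literal["physical", "procedural"]:
--     found_keyword: str | None = None
--     take_type: Literal["physical", "procedural", None] = None
--     for keyword in (
--         "dance",
--         "soccer",
--         "basketball",
--         "piano",
--         "guitar",
--         "violin",
--         "bouldering",
--         "music",
--         "rockclimbing",
--     ):
--         if keyword in take_name.lower():
--             assert take_type is None
--             take_type = "physical"
--             found_keyword = keyword
--     for keyword in (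
--         "cpr",
--         "pcr",
--         "cooking",
--         "covid",
--         "bike",
--         "sushi",
--         "salad",
--         "samosa",
--         "omelet",
--     ):
--         if keyword in take_name.lower():
--             assert take_type is None
--             take_type = "procedural"
--             found_keyword = keyword
--     assert take_type is not None, f"Could not detect take type for {take_name}"
--     assert found_keyword is not None
--     return take_type
-- ===== SOURCE B (Python) =====
-- _TAKE_TYPE_BY_KEYWORD = {
--     "dance": "physical",
--     "soccer": "physical",
--     "basketball": "physical",
--     "piano": "physical",
--     "guitar": "physical",
--     "violin": "physical",
--     "bouldering": "physical",
--     "music": "physical",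
--     "rockclimbing": "physical",
--     "cpr": "procedural",
--     "pcr": "procedural",
--     "cooking": "procedural",
--     "covid": "procedural",
--     "bike": "procedural",
--     "sushi": "procedural",
--     "salad": "procedural",
--     "samosa": "procedural",
--     "omelet": "procedural",
-- }
-- _WINDOW_LENGTHS = (3, 4, 5, 6, 7, 10, 12)  # the distinct keyword lengths
--
--
-- def _get_take_type(take_name: str):
--     # Naive multi-pattern matching: slide over the lowered name once and look
--     # each window of a keyword length up in a hash table, collecting the set of
--     # keywords that actually occur.
--     lower = take_name.lower()
--     hits = {
--         lower[i : i + n]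
--         for i in range(len(lower))
--         for n in _WINDOW_LENGTHS
--         if lower[i : i + n] in _TAKE_TYPE_BY_KEYWORD
--     }
--     assert hits, f"Could not detect take type for {take_name}"
--     assert len(hits) == 1
--     return _TAKE_TYPE_BY_KEYWORD[hits.pop()]
-- ===== Notes on version B (the rewrite author's own statement) =====
-- stated objective: alternative
-- what changed: Replaces A's per-keyword substring searches (18 'k in name' scans with mutable loop state) by naive multi-pattern matching: one left-to-right slide over the lowered name that looks each window of a keyword length up in a hash table, collecting the set of occurring keywords, then asserting the set is a singleton and mapping it through the same table.
import Mathlib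
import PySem

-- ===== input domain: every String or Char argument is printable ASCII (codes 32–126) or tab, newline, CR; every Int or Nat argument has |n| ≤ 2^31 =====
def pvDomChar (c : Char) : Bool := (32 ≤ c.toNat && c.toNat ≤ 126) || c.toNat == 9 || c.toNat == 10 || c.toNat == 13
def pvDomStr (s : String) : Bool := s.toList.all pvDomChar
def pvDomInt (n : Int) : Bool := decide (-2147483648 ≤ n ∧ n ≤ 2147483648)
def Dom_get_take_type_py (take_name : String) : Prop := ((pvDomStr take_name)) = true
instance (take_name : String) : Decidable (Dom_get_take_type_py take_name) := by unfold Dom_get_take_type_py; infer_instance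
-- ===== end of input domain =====

-- B replaces A's 18 per-keyword substring searches by one sliding-window pass over the
-- lowered name with a hash-table lookup per window (naive multi-pattern matching).
-- ===== PORT A =====
-- A's first keyword tuple ("physical" group) and second keyword tuple ("procedural" group)
def physKeywords : List String :=
  ["dance","soccer","basketball","piano","guitar","violin","bouldering","music","rockclimbing"]
def procKeywords : List String :=
  ["cpr","pcr","cooking","covid","bike","sushi","salad","samosa","omelet"]
-- state = (found_keyword, take_type); the in-loop `assert take_type is None` and the final
-- `assert take_type is not None` raise exactly outside Pre_, where we return "".
def get_take_type_py (take_name : String) : String :=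
  let st1 : Option String × Option String :=
    physKeywords.foldl
      (fun st keyword =>
        if PySem.Str.isIn keyword (PySem.Str.lower take_name) then (some keyword, some "physical") else st)
      (none, none)
  let st2 : Option String × Option String :=
    procKeywords.foldl
      (fun st keyword =>
        if PySem.Str.isIn keyword (PySem.Str.lower take_name) then (some keyword, some "procedural") else st)
      st1
  st2.2.getD ""


-- ===== PORT B =====
-- Source B's module-level dict _TAKE_TYPE_BY_KEYWORD (insertion order; string keys as List Char)
def kwTable : PySem.Dict (List Char) String :=
  PySem.Dict.ofList
    [("dance".toList,"physical"),("soccer".toList,"physical"),("basketball".toList,"physical"),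
     ("piano".toList,"physical"),("guitar".toList,"physical"),("violin".toList,"physical"),
     ("bouldering".toList,"physical"),("music".toList,"physical"),("rockclimbing".toList,"physical"),
     ("cpr".toList,"procedural"),("pcr".toList,"procedural"),("cooking".toList,"procedural"),
     ("covid".toList,"procedural"),("bike".toList,"procedural"),("sushi".toList,"procedural"),
     ("salad".toList,"procedural"),("samosa".toList,"procedural"),("omelet".toList,"procedural")]
-- Source B's _WINDOW_LENGTHS (the distinct keyword lengths)
def windowLengths : List Int := [3, 4, 5, 6, 7, 10, 12]

-- the set comprehension is the nested fold building a PySem.Set of the occurring keywords;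
-- the two asserts raise exactly outside Pre_ (we return "" there); hits.pop() on the
-- singleton set is its sole element.
def get_take_type_py_alt (take_name : String) : String :=
  let lower := (PySem.Str.lower take_name).toList
  let hits : PySem.Set (List Char) :=
    (PySem.List.pyRange 0 lower.length 1).foldl
      (fun s i =>
        windowLengths.foldl
          (fun s n =>
            if (kwTable.get? (PySem.List.slice lower (some i) (some (i + n)))).isSome
            then PySem.Set.add s (PySem.List.slice lower (some i) (some (i + n)))
            else s)
          s)
      PySem.Set.empty
  match hits with
  | [w] => kwTable.getD w ""
  | _ => ""


-- ===== PRECONDITION & SPEC =====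
-- Pre_: exactly one of the 18 keywords occurs in take_name.lower(); on all other inputs BOTH
-- A and B raise AssertionError (no match, or a duplicate match), so nothing is excluded that A returns on.
def preKeywords : List (String × String) :=
  [("dance","physical"),("soccer","physical"),("basketball","physical"),("piano","physical"),
   ("guitar","physical"),("violin","physical"),("bouldering","physical"),("music","physical"),
   ("rockclimbing","physical"),
   ("cpr","procedural"),("pcr","procedural"),("cooking","procedural"),("covid","procedural"),
   ("bike","procedural"),("sushi","procedural"),("salad","procedural"),("samosa","procedural"),
   ("omelet","procedural")]

def Pre_get_take_type_py (take_name : String) : Prop :=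
  (preKeywords.filter (fun kv => PySem.Str.isIn kv.1 (PySem.Str.lower take_name))).length = 1
instance (take_name : String) : Decidable (Pre_get_take_type_py take_name) := by
  unfold Pre_get_take_type_py; infer_instance

def pvWitness_get_take_type_py : String := "Dance_take_01"

def Spec_get_take_type_py (take_name : String) (out : String) : Prop := out = get_take_type_py_alt take_name
instance (take_name : String) (out : String) : Decidable (Spec_get_take_type_py take_name out) := by
  unfold Spec_get_take_type_py; infer_instance

-- ===== CLAIM (what is proved, stated in full; the proofs are below) =====
def Claim_equal_get_take_type_py : Prop := ∀ (take_name : String), Dom_get_take_type_py take_name → Pre_get_take_type_py take_name → Spec_get_take_type_py take_name (get_take_type_py take_name)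

-- ===== LEMMAS AND PROOFS =====

theorem foldl_snd_eq_any (p : String → Bool) (t : String) (L : List String)
    (a : Option String × Option String) :
    (L.foldl (fun st k => if p k then (some k, some t) else st) a).2
      = if L.any p then some t else a.2 := by
  induction L generalizing a with
  | nil => simp
  | cons h tl ih => by_cases hp : p h <;> simp [hp, ih]

theorem kw_facts : ∀ kv ∈ preKeywords, kv.1.toList ≠ [] ∧
    ((kv.1.toList.length : Int) ∈ windowLengths) ∧ kwTable.get? kv.1.toList = some kv.2 := by
  decide

theorem windowLengths_nonneg : ∀ n ∈ windowLengths, 0 ≤ n := by decide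

theorem preKeywords_split : preKeywords
    = physKeywords.map (fun k => (k, "physical")) ++ procKeywords.map (fun k => (k, "procedural")) := by
  decide

theorem kwTable_items : kwTable.items = preKeywords.map (fun kv => (kv.1.toList, kv.2)) := by decide

theorem kwTable_isSome (w : List Char) (h : (kwTable.get? w).isSome = true) :
    ∃ kv ∈ preKeywords, kv.1.toList = w := by
  simp only [PySem.Dict.get?, Option.isSome_map, List.find?_isSome, kwTable_items,
    List.mem_map] at h
  obtain ⟨p, ⟨kv, hkv, rfl⟩, hb⟩ := h
  exact ⟨kv, hkv, by simpa using hb⟩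

theorem setfold_inner (c : List Char → Bool) (g : Int → List Char) (k₀ : List Char)
    (N : List Int) (hall : ∀ n ∈ N, c (g n) = true → g n = k₀)
    (s : PySem.Set (List Char)) (hs : s = [] ∨ s = [k₀]) :
    N.foldl (fun s n => if c (g n) then PySem.Set.add s (g n) else s) s
      = if s = [k₀] ∨ ∃ n ∈ N, c (g n) = true then [k₀] else [] := by
  induction N generalizing s with
  | nil => rcases hs with h | h <;> simp [h]
  | cons n tl ih =>
    simp only [List.foldl_cons]
    by_cases hc : c (g n) = true
    · have hg := hall n (List.mem_cons_self) hc
      have step : PySem.Set.add s (g n) = [k₀] := by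
        rcases hs with h | h <;> simp [h, hg, PySem.Set.add]
      rw [if_pos hc, step, ih (fun m hm h => hall m (List.mem_cons_of_mem _ hm) h) [k₀] (Or.inr rfl)]
      simp [hc]
    · rw [if_neg hc, ih (fun m hm h => hall m (List.mem_cons_of_mem _ hm) h) s hs]
      simp [hc]

theorem setfold_outer (c : List Char → Bool) (g : Int → Int → List Char) (k₀ : List Char)
    (I N : List Int) (hall : ∀ i ∈ I, ∀ n ∈ N, c (g i n) = true → g i n = k₀)
    (s : PySem.Set (List Char)) (hs : s = [] ∨ s = [k₀]) :
    I.foldl (fun s i => N.foldl (fun s n => if c (g i n) then PySem.Set.add s (g i n) else s) s) s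
      = if s = [k₀] ∨ ∃ i ∈ I, ∃ n ∈ N, c (g i n) = true then [k₀] else [] := by
  induction I generalizing s with
  | nil => rcases hs with h | h <;> simp [h]
  | cons i tl ih =>
    simp only [List.foldl_cons]
    rw [setfold_inner c (g i) k₀ N (fun n hn h => hall i List.mem_cons_self n hn h) s hs]
    by_cases hmatch : s = [k₀] ∨ ∃ n ∈ N, c (g i n) = true
    · rw [if_pos hmatch, ih (fun j hj => hall j (List.mem_cons_of_mem _ hj)) [k₀] (Or.inr rfl)]
      have : (([k₀] : PySem.Set (List Char)) = [k₀] ∨ ∃ j ∈ tl, ∃ n ∈ N, c (g j n) = true) := Or.inl rfl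
      rw [if_pos this, if_pos]
      rcases hmatch with h | ⟨n, hn, hcn⟩
      · exact Or.inl h
      · exact Or.inr ⟨i, List.mem_cons_self, n, hn, hcn⟩
    · rw [if_neg hmatch, ih (fun j hj => hall j (List.mem_cons_of_mem _ hj)) [] (Or.inl rfl)]
      push Not at hmatch
      by_cases hrest : ∃ j ∈ tl, ∃ n ∈ N, c (g j n) = true
      · rw [if_pos (Or.inr hrest), if_pos (Or.inr (by
          obtain ⟨j, hj, hn⟩ := hrest; exact ⟨j, List.mem_cons_of_mem _ hj, hn⟩))]
      · rw [if_neg (by simp_all), if_neg]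
        rintro (h | ⟨j, hj, n, hn, hcn⟩)
        · exact hmatch.1 h
        · rcases List.mem_cons.mp hj with rfl | hj'
          · exact hmatch.2 n hn hcn
          · exact hrest ⟨j, hj', n, hn, hcn⟩

theorem slice_isInfix (cl : List Char) (i n : Int) (hi : 0 ≤ i) (hn : 0 ≤ n) :
    PySem.List.slice cl (some i) (some (i + n)) <:+: cl := by
  rw [PySem.List.slice_toNat cl hi (by omega)]
  exact (((cl.drop i.toNat).take_prefix _).isInfix).trans (cl.drop_suffix i.toNat).isInfix

theorem a_value (q : String → Bool) (kv₀ : String × String)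
    (hfil : preKeywords.filter (fun kv => q kv.1) = [kv₀]) :
    ((procKeywords.foldl
        (fun st keyword => if q keyword then (some keyword, some "procedural") else st)
        (physKeywords.foldl
          (fun st keyword => if q keyword then (some keyword, some "physical") else st)
          (none, none))).2).getD "" = kv₀.2 := by
  rw [foldl_snd_eq_any q, foldl_snd_eq_any q]
  have hsplit : (physKeywords.map (fun k => (k, "physical"))).filter (fun kv => q kv.1)
      ++ (procKeywords.map (fun k => (k, "procedural"))).filter (fun kv => q kv.1) = [kv₀] := by
    rw [← List.filter_append, ← preKeywords_split]; exact hfil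
  rcases List.append_eq_cons_iff.mp hsplit with ⟨hP, hQ⟩ | ⟨as, hP, hQ⟩
  · -- physical part empty, kv₀ is in the procedural group
    have hkv : kv₀ ∈ (procKeywords.map (fun k => (k, "procedural"))).filter (fun kv => q kv.1) := by
      rw [hQ]; exact List.mem_singleton_self kv₀
    obtain ⟨hkvm, hkvp⟩ := List.mem_filter.mp hkv
    obtain ⟨k, hk, rfl⟩ := List.mem_map.mp hkvm
    have hany : procKeywords.any q = true := List.any_eq_true.mpr ⟨k, hk, hkvp⟩
    simp [hany]
  · -- kv₀ is in the physical group, procedural part empty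
    have has : as = [] ∧ (procKeywords.map (fun k => (k, "procedural"))).filter (fun kv => q kv.1) = [] :=
      List.append_eq_nil_iff.mp hQ.symm
    have hP' : (physKeywords.map (fun k => (k, "physical"))).filter (fun kv => q kv.1) = [kv₀] := by
      rw [hP, has.1]
    have hkv : kv₀ ∈ (physKeywords.map (fun k => (k, "physical"))).filter (fun kv => q kv.1) := by
      rw [hP']; exact List.mem_singleton_self kv₀
    obtain ⟨hkvm, hkvp⟩ := List.mem_filter.mp hkv
    obtain ⟨k, hk, rfl⟩ := List.mem_map.mp hkvm
    have hanyP : physKeywords.any q = true := List.any_eq_true.mpr ⟨k, hk, hkvp⟩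
    have hanyQ : procKeywords.any q = false := by
      rw [List.any_eq_false]
      intro a ha hqa
      have : (a, "procedural") ∈ (procKeywords.map (fun k => (k, "procedural"))).filter (fun kv => q kv.1) :=
        List.mem_filter.mpr ⟨List.mem_map.mpr ⟨a, ha, rfl⟩, hqa⟩
      rw [has.2] at this; simp at this
    simp [hanyP, hanyQ]

theorem b_value (cl : List Char) (kv₀ : String × String) (hmem : kv₀ ∈ preKeywords)
    (huniq : ∀ kv ∈ preKeywords, kv.1.toList <:+: cl → kv = kv₀)
    (hocc : kv₀.1.toList <:+: cl) :
    (match (PySem.List.pyRange 0 cl.length 1).foldl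
      (fun s i =>
        windowLengths.foldl
          (fun s n =>
            if (kwTable.get? (PySem.List.slice cl (some i) (some (i + n)))).isSome
            then PySem.Set.add s (PySem.List.slice cl (some i) (some (i + n)))
            else s)
          s)
      PySem.Set.empty with
      | [w] => kwTable.getD w ""
      | _ => "") = kv₀.2 := by
  obtain ⟨hne0, hlen0, hget0⟩ := kw_facts kv₀ hmem
  rw [setfold_outer (fun w => (kwTable.get? w).isSome)
      (fun i n => PySem.List.slice cl (some i) (some (i + n))) kv₀.1.toList _ _
      ?hall PySem.Set.empty (Or.inl rfl)]
  case hall =>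
    intro i hi n hn hsome
    obtain ⟨kv, hkvmem, hkveq⟩ := kwTable_isSome _ hsome
    have hi0 : 0 ≤ i := by rw [PySem.List.mem_pyRange_one] at hi; exact hi.1
    have hinf : kv.1.toList <:+: cl :=
      hkveq ▸ slice_isInfix cl i n hi0 (windowLengths_nonneg n hn)
    rw [← hkveq, huniq kv hkvmem hinf]
  rw [if_pos ?hex]
  · simp [PySem.Dict.getD, hget0]
  case hex =>
    refine Or.inr ?_
    have : ∃ j, kv₀.1.toList <+: cl.drop j := by
      rw [PySem.Chars.exists_prefix_drop_iff_isIn, PySem.Chars.isIn_iff_infix]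
      exact hocc
    obtain ⟨j, hj⟩ := this
    have hjlt : j < cl.length := by
      by_contra hge
      have hdrop : cl.drop j = [] := List.drop_eq_nil_iff.mpr (by omega)
      rw [hdrop] at hj
      exact hne0 (List.prefix_nil.mp hj)
    refine ⟨(j : Int), ?_, (kv₀.1.toList.length : Int), hlen0, ?_⟩
    · rw [PySem.List.mem_pyRange_one]
      exact ⟨by exact_mod_cast Nat.zero_le j, by exact_mod_cast hjlt⟩
    · have hsl : PySem.List.slice cl (some (j : Int)) (some ((j : Int) + (kv₀.1.toList.length : Int)))
          = kv₀.1.toList := by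
        rw [PySem.List.slice_natCast_add]
        exact (List.prefix_iff_eq_take.mp hj).symm
      rw [hsl, hget0]; rfl

theorem main (take_name : String)
    (hpre : (preKeywords.filter (fun kv => PySem.Str.isIn kv.1 (PySem.Str.lower take_name))).length = 1) :
    get_take_type_py take_name = get_take_type_py_alt take_name := by
  obtain ⟨kv₀, hfil⟩ := List.length_eq_one_iff.mp hpre
  have hmem0 : kv₀ ∈ preKeywords := (List.mem_filter.mp (hfil ▸ List.mem_singleton_self kv₀)).1
  have hp0 := (List.mem_filter.mp (hfil ▸ List.mem_singleton_self kv₀)).2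
  have hiscl : ∀ kv : String × String, PySem.Str.isIn kv.1 (PySem.Str.lower take_name) = true
      ↔ kv.1.toList <:+: (PySem.Str.lower take_name).toList := fun kv =>
    PySem.Str.isIn_iff_infix kv.1 (PySem.Str.lower take_name)
  have huniq : ∀ kv ∈ preKeywords, kv.1.toList <:+: (PySem.Str.lower take_name).toList → kv = kv₀ := by
    intro kv h hinf
    have hx : kv ∈ preKeywords.filter (fun kv => PySem.Str.isIn kv.1 (PySem.Str.lower take_name)) :=
      List.mem_filter.mpr ⟨h, (hiscl kv).mpr hinf⟩
    rw [hfil] at hx; simpa using hx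
  have hA : get_take_type_py take_name = kv₀.2 := by
    simp only [get_take_type_py]
    exact a_value (fun k => PySem.Str.isIn k (PySem.Str.lower take_name)) kv₀ hfil
  have hB : get_take_type_py_alt take_name = kv₀.2 := by
    simp only [get_take_type_py_alt]
    exact b_value ((PySem.Str.lower take_name).toList) kv₀ hmem0 huniq ((hiscl kv₀).mp hp0)
  rw [hA, hB]

-- ===== VERDICT (by name: the statement is the Claim_ definition above) =====
theorem get_take_type_py_spec : Claim_equal_get_take_type_py := by
  intro take_name _ hpre
  unfold Spec_get_take_type_py
  exact main take_name hpre
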